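-- pv_equiv track=rewrite | github.com/Manish7011/Agents | 07-HumanResources/Hr-Hiring-System-Agent/supervisor/graph.py | _infer_route_from_text
-- ===== SOURCE A (Python) =====
-- ROUTE_KEYWORDS = {
--     "job_agent": (
--         "job", "vacancy", "vacancies", "open role", "jd", "job description", "posting", "department jobs",
--     ),
--     "resume_agent": (
--         "resume", "cv", "candidate", "application", "score", "shortlist", "screening", "top candidates",
--     ),
--     "interview_agent": (
--         "interview", "schedule", "slot", "feedback", "panel", "upcoming interviews", "reschedule", "cancel interview",
--     ),
--     "offer_agent": (
--         "offer", "salary", "compensation", "approval", "accept offer", "decline", "negotiate",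
--     ),
--     "onboarding_agent": (
--         "onboard", "onboarding", "day 1", "checklist", "buddy", "orientation", "welcome email",
--     ),
--     "comms_agent": (
--         "email", "notify", "status update", "rejection email", "invite", "bulk email", "communication history",
--     ),
--     "analytics_agent": (
--         "analytics", "report", "pipeline", "metrics", "time-to-hire", "time to hire", "funnel", "statistics",
--     ),
-- }
--
-- def _infer_route_from_text(text: str) -> str:
--     if not text:
--         return ""
--     scores = {}
--     for agent_name, keys in ROUTE_KEYWORDS.items():
--         score = sum(1 for k in keys if k in text)
--         if score:
--             scores[agent_name] = score
--     if not scores: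
--         return ""
--     return max(scores, key=scores.get)
-- ===== SOURCE B (Python) =====
-- ROUTE_KEYWORDS = {
--     "job_agent": (
--         "job", "vacancy", "vacancies", "open role", "jd", "job description", "posting", "department jobs",
--     ),
--     "resume_agent": (
--         "resume", "cv", "candidate", "application", "score", "shortlist", "screening", "top candidates",
--     ),
--     "interview_agent": (
--         "interview", "schedule", "slot", "feedback", "panel", "upcoming interviews", "reschedule", "cancel interview",
--     ),
--     "offer_agent": (
--         "offer", "salary", "compensation", "approval", "accept offer", "decline", "negotiate",
--     ),
--     "onboarding_agent": (
--         "onboard", "onboarding", "day 1", "checklist", "buddy", "orientation", "welcome email",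
--     ),
--     "comms_agent": (
--         "email", "notify", "status update", "rejection email", "invite", "bulk email", "communication history",
--     ),
--     "analytics_agent": (
--         "analytics", "report", "pipeline", "metrics", "time-to-hire", "time to hire", "funnel", "statistics",
--     ),
-- }
--
-- def _infer_route_from_text(text: str) -> str:
--     if not text:
--         return ""
--
--     def best(items):
--         # recursively pick the best (agent, score) of the tail, then let the head
--         # win exactly when its score is positive and at least the tail's best
--         if not items:
--             return ("", 0)
--         agent, keys = items[0]
--         score = len([k for k in keys if k in text])
--         rest = best(items[1:])
--         return (agent, score) if score > 0 and score >= rest[1] else rest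
--
--     return best(list(ROUTE_KEYWORDS.items()))[0]
-- ===== Notes on version B (the rewrite author's own statement) =====
-- stated objective: alternative
-- what changed: Replaces A's two-phase build-a-nonzero-scores-dict-then-max(key=scores.get) with a back-to-front structural recursion over the keyword table that returns the best (agent, score) of the tail and lets the head override it when its score is positive and at least the tail's best, so the first-in-order maximal agent (or "") comes out with no dict and no max call.
import Mathlib
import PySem

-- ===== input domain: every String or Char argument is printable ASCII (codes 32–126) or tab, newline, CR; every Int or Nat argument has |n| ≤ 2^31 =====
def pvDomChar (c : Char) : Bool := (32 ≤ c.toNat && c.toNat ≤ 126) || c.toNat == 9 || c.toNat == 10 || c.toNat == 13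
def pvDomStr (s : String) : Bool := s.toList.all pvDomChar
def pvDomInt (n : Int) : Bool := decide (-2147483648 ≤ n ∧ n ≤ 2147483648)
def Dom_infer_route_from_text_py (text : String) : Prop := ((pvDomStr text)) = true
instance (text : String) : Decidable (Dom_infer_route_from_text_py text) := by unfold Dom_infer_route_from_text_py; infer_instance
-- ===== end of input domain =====

-- B replaces A's build-scores-dict-then-max(key=scores.get) with a back-to-front structural
-- recursion over the keyword table (head wins on score ≥ best-of-tail); alternative decomposition, no dict, no max.

-- ===== PORT A =====
-- ROUTE_KEYWORDS, in the module's insertion order (shared module constant, used by both programs)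
def pvRouteKeywords : List (String × List String) := [
  ("job_agent", ["job", "vacancy", "vacancies", "open role", "jd", "job description", "posting", "department jobs"]),
  ("resume_agent", ["resume", "cv", "candidate", "application", "score", "shortlist", "screening", "top candidates"]),
  ("interview_agent", ["interview", "schedule", "slot", "feedback", "panel", "upcoming interviews", "reschedule", "cancel interview"]),
  ("offer_agent", ["offer", "salary", "compensation", "approval", "accept offer", "decline", "negotiate"]),
  ("onboarding_agent", ["onboard", "onboarding", "day 1", "checklist", "buddy", "orientation", "welcome email"]),
  ("comms_agent", ["email", "notify", "status update", "rejection email", "invite", "bulk email", "communication history"]),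
  ("analytics_agent", ["analytics", "report", "pipeline", "metrics", "time-to-hire", "time to hire", "funnel", "statistics"])]

-- A's score = sum(1 for k in keys if k in text)
def pvScore (text : String) (keys : List String) : Int :=
  keys.foldl (fun acc k => if PySem.Str.isIn k text then acc + 1 else acc) 0

-- A's `scores` dict: agents with nonzero score, in insertion order
def pvScoresA (text : String) : PySem.Dict String Int :=
  pvRouteKeywords.foldl (fun sc p =>
    if pvScore text p.2 ≠ 0 then sc.insert p.1 (pvScore text p.2) else sc) ⟨[]⟩

-- literal port of A: build the dict of nonzero scores, then max(scores, key=scores.get)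
-- (scores.get is only ever applied to keys of scores, where it equals getD · 0;
--  max on a nonempty dict never raises, so the `none` arm of the match is unreachable)
def infer_route_from_text_py (text : String) : String :=
  if text = "" then ""
  else if (pvScoresA text).items = [] then ""
  else
    match PySem.List.max? (pvScoresA text).keys (fun a => (pvScoresA text).getD a 0) with
    | some m => m
    | none => ""

-- ===== PORT B =====
-- Source B's inner `best`: recursion on the item list; head's score = len([k for k in keys if k in text]);
-- head overrides the tail's best exactly when its score is positive and at least the tail's best.
def pvBest (text : String) : List (String × List String) → String × Int
  | [] => ("", 0)
  | p :: t =>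
    let score : Int := ((p.2.filter (fun k => PySem.Str.isIn k text)).length : Int)
    let rest := pvBest text t
    if 0 < score ∧ rest.2 ≤ score then (p.1, score) else rest

-- literal port of B: guard, then the agent component of the recursive best
def infer_route_from_text_py_alt (text : String) : String :=
  if text = "" then "" else (pvBest text pvRouteKeywords).1

-- ===== PRECONDITION & SPEC =====
def Spec_infer_route_from_text_py (text : String) (out : String) : Prop := out = infer_route_from_text_py_alt text
instance (text : String) (out : String) : Decidable (Spec_infer_route_from_text_py text out) := by unfold Spec_infer_route_from_text_py; infer_instance

-- ===== CLAIM (what is proved, stated in full; the proofs are below) =====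
def Claim_equal_infer_route_from_text_py : Prop := ∀ (text : String), Dom_infer_route_from_text_py text → Spec_infer_route_from_text_py text (infer_route_from_text_py text)

-- ===== LEMMAS AND PROOFS =====

-- the fold step of PySem.List.max?
def pvMstep {α κ : Type} [LT κ] [DecidableLT κ] (key : α → κ) (acc : Option α) (x : α) : Option α :=
  match acc with
  | none => some x
  | some m => if key m < key x then some x else some m

-- the recursive argmax of B, abstracted over precomputed (agent, score) entries
def pvGoE : List (String × Int) → String × Int
  | [] => ("", 0)
  | q :: t =>
    let r := pvGoE t
    if 0 < q.2 ∧ r.2 ≤ q.2 then q else r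

lemma pv_max?_eq_foldl {α κ : Type} [LT κ] [DecidableLT κ] (xs : List α) (key : α → κ) :
    PySem.List.max? xs key = xs.foldl (pvMstep key) none := rfl

lemma pvScore_nonneg (text : String) (ks : List String) : 0 ≤ pvScore text ks := by
  simp only [pvScore, PySem.List.foldl_if_add_one, zero_add]
  exact Int.natCast_nonneg _

-- B's count-by-filter-length equals A's count-by-summing
lemma pvScoreB_eq (text : String) (ks : List String) :
    ((ks.filter (fun k => PySem.Str.isIn k text)).length : Int) = pvScore text ks := by
  rw [pvScore, PySem.List.foldl_if_add_one, zero_add]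
  simp [List.countP_eq_length_filter]

-- pvBest is pvGoE over the (agent, score) entries
lemma pvBest_eq_goE (text : String) : ∀ l : List (String × List String),
    pvBest text l = pvGoE (l.map (fun p => (p.1, pvScore text p.2))) := by
  intro l
  induction l with
  | nil => rfl
  | cons p t ih => simp only [pvBest, pvGoE, List.map_cons, ih, pvScoreB_eq]

-- pvGoE returns the base pair or a positive-score entry
lemma pvGoE_cases : ∀ e : List (String × Int), pvGoE e = ("", 0) ∨ 0 < (pvGoE e).2 := by
  intro e
  induction e with
  | nil => exact Or.inl rfl
  | cons q t ih =>
    simp only [pvGoE]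
    split_ifs with h
    · exact Or.inr h.1
    · exact ih

-- the left running-best fold (strict >) computes pvGoE, for any nonnegative start below it
lemma pv_runbest : ∀ (e : List (String × Int)), (∀ p ∈ e, 0 ≤ p.2) →
    ∀ (acc : String × Int), 0 ≤ acc.2 →
    e.foldl (fun b q => if b.2 < q.2 then q else b) acc
      = if acc.2 < (pvGoE e).2 then pvGoE e else acc := by
  intro e
  induction e with
  | nil =>
    intro _ acc hacc
    simp only [List.foldl_nil, pvGoE]
    rw [if_neg (by omega)]
  | cons q t ih =>
    intro he acc hacc
    have hq : 0 ≤ q.2 := he q (by simp)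
    have ht : ∀ p ∈ t, 0 ≤ p.2 := fun p hp => he p (by simp [hp])
    have hr0 : 0 ≤ (pvGoE t).2 := by
      rcases pvGoE_cases t with h | h
      · simp [h]
      · omega
    simp only [List.foldl_cons, pvGoE]
    by_cases h1 : acc.2 < q.2
    · rw [if_pos h1, ih ht q hq]
      split_ifs <;> first | rfl | omega
    · rw [if_neg h1, ih ht acc hacc]
      split_ifs <;> first | rfl | omega

-- building A's dict over pairwise-distinct fresh keys is just filtering the nonzero entries
lemma pv_dict_build : ∀ (l : List (String × Int)) (sc : PySem.Dict String Int),
    (l.map Prod.fst).Nodup → (∀ p ∈ l, sc.contains p.1 = false) →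
    (l.foldl (fun sc q => if q.2 ≠ 0 then sc.insert q.1 q.2 else sc) sc).items
      = sc.items ++ l.filter (fun q => decide (q.2 ≠ 0)) := by
  intro l
  induction l with
  | nil => intro sc _ _; simp
  | cons p t ih =>
    intro sc hnd hfresh
    simp only [List.map_cons, List.nodup_cons] at hnd
    by_cases hz : p.2 ≠ 0
    · have hc : sc.contains p.1 = false := hfresh p (by simp)
      have hins : (sc.insert p.1 p.2).items = sc.items ++ [(p.1, p.2)] := by
        simp [PySem.Dict.insert, hc]
      have hfresh' : ∀ q ∈ t, (sc.insert p.1 p.2).contains q.1 = false := by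
        intro q hq
        have h1 : sc.contains q.1 = false := hfresh q (by simp [hq])
        have h2 : p.1 ≠ q.1 := by
          intro h; exact hnd.1 (h ▸ List.mem_map_of_mem hq)
        simp only [PySem.Dict.contains, hins, List.any_append] at *
        simp [h1, h2]
      simp only [List.foldl_cons, List.filter_cons, decide_eq_true_eq, if_pos hz]
      rw [ih _ hnd.2 hfresh', hins]
      simp
    · rw [not_not] at hz
      simp only [List.foldl_cons, hz, ne_eq, not_true_eq_false, if_false, List.filter_cons]
      rw [ih _ hnd.2 (fun q hq => hfresh q (by simp [hq]))]
      simp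

-- the max?-fold commutes with mapping the elements
lemma pv_max?_map {α β κ : Type} [LT κ] [DecidableLT κ] (f : α → β) (key : β → κ) :
    ∀ (l : List α) (acc : Option α),
    (l.map f).foldl (pvMstep key) (acc.map f)
      = (l.foldl (pvMstep (fun x => key (f x))) acc).map f := by
  intro l
  induction l with
  | nil => intro acc; simp
  | cons x t ih =>
    intro acc
    simp only [List.map_cons, List.foldl_cons]
    cases acc with
    | none => exact ih (some x)
    | some m =>
      simp only [Option.map_some, pvMstep]
      split_ifs <;> [exact ih (some x); exact ih (some m)]

-- the max?-fold only looks at the key on list members and on the accumulator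
lemma pv_fold_congr {α κ : Type} [LT κ] [DecidableLT κ] (k1 k2 : α → κ) :
    ∀ (l : List α), (∀ x ∈ l, k1 x = k2 x) →
    ∀ (acc : Option α), (∀ m, acc = some m → k1 m = k2 m) →
    l.foldl (pvMstep k1) acc = l.foldl (pvMstep k2) acc := by
  intro l
  induction l with
  | nil => intro _ acc _; rfl
  | cons x t ih =>
    intro hl acc hacc
    have hx : k1 x = k2 x := hl x (by simp)
    simp only [List.foldl_cons]
    cases acc with
    | none =>
      rw [show pvMstep k1 none x = some x from rfl, show pvMstep k2 none x = some x from rfl]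
      exact ih (fun y hy => hl y (by simp [hy])) (some x)
        (by intro m hm; cases hm; exact hx)
    | some m =>
      have hm : k1 m = k2 m := hacc m rfl
      simp only [pvMstep, hx, hm]
      split_ifs
      · exact ih (fun y hy => hl y (by simp [hy])) (some x)
          (by intro m' hm'; cases hm'; exact hx)
      · exact ih (fun y hy => hl y (by simp [hy])) (some m)
          (by intro m' hm'; cases hm'; exact hm)

-- first find? hit on a member, under distinct keys
lemma pv_find_self : ∀ (l : List (String × Int)), (l.map Prod.fst).Nodup →
    ∀ p ∈ l, l.find? (fun q => q.1 == p.1) = some p := by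
  intro l
  induction l with
  | nil => intro _ p hp; cases hp
  | cons h t ih =>
    intro hnd p hp
    simp only [List.map_cons, List.nodup_cons] at hnd
    rcases List.mem_cons.mp hp with rfl | hp
    · simp [List.find?]
    · have hne : h.1 ≠ p.1 := by
        intro he; exact hnd.1 (he ▸ List.mem_map_of_mem hp)
      rw [List.find?_cons_of_neg (by simp [hne])]
      exact ih hnd.2 p hp

-- the running-argmax invariant tying the left running-best pair to the max?-fold over the nonzero entries
lemma pv_main : ∀ (e : List (String × Int)), (∀ p ∈ e, 0 ≤ p.2) →
    ∀ (b : String × Int) (acc : Option (String × Int)),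
    ((b.2 = 0 ∧ acc = none ∧ b.1 = "") ∨ (0 < b.2 ∧ acc = some b)) →
    (let b' := e.foldl (fun b q => if b.2 < q.2 then q else b) b
     let a' := e.foldl (fun acc q => if decide (q.2 ≠ 0) = true then pvMstep Prod.snd acc q else acc) acc
     (b'.2 = 0 ∧ a' = none ∧ b'.1 = "") ∨ (0 < b'.2 ∧ a' = some b')) := by
  intro e
  induction e with
  | nil => intro _ b acc h; exact h
  | cons q t ih =>
    intro he b acc h
    have hq : 0 ≤ q.2 := he q (by simp)
    have ht : ∀ p ∈ t, 0 ≤ p.2 := fun p hp => he p (by simp [hp])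
    simp only [List.foldl_cons]
    by_cases hz : q.2 = 0
    · have hA : (if decide (q.2 ≠ 0) = true then pvMstep Prod.snd acc q else acc) = acc := by
        simp [hz]
      have hB : (if b.2 < q.2 then q else b) = b := by
        rcases h with ⟨h1, _, _⟩ | ⟨h1, _⟩ <;> rw [if_neg (by omega)]
      rw [hA, hB]
      exact ih ht b acc h
    · have hpos : 0 < q.2 := lt_of_le_of_ne hq (Ne.symm hz)
      rcases h with ⟨h1, h2, h3⟩ | ⟨h1, h2⟩
      · have hA : (if decide (q.2 ≠ 0) = true then pvMstep Prod.snd acc q else acc) = some q := by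
          subst h2; simp [pvMstep, hz]
        have hB : (if b.2 < q.2 then q else b) = q := if_pos (by omega)
        rw [hA, hB]
        exact ih ht q (some q) (Or.inr ⟨hpos, rfl⟩)
      · by_cases hlt : b.2 < q.2
        · have hA : (if decide (q.2 ≠ 0) = true then pvMstep Prod.snd acc q else acc) = some q := by
            subst h2; simp [pvMstep, hz, hlt]
          rw [hA, if_pos hlt]
          exact ih ht q (some q) (Or.inr ⟨hpos, rfl⟩)
        · have hA : (if decide (q.2 ≠ 0) = true then pvMstep Prod.snd acc q else acc) = some b := by
            subst h2; simp [pvMstep, hz, hlt]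
          rw [hA, if_neg hlt]
          exact ih ht b (some b) (Or.inr ⟨h1, rfl⟩)

-- ===== VERDICT (by name: the statement is the Claim_ definition above) =====
theorem infer_route_from_text_py_spec : Claim_equal_infer_route_from_text_py := by
  intro text _
  unfold Spec_infer_route_from_text_py infer_route_from_text_py infer_route_from_text_py_alt
  by_cases hT : text = ""
  · simp [hT]
  · rw [if_neg hT, if_neg hT]
    -- the shared entry list: (agent, score) pairs in insertion order
    set f : String × List String → String × Int := fun p => (p.1, pvScore text p.2) with hf
    set e : List (String × Int) := pvRouteKeywords.map f with he
    have hend : (e.map Prod.fst).Nodup := by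
      rw [he, List.map_map]
      show (pvRouteKeywords.map Prod.fst).Nodup
      decide
    have henn : ∀ p ∈ e, 0 ≤ p.2 := by
      intro p hp
      rcases List.mem_map.mp hp with ⟨q, _, rfl⟩
      exact pvScore_nonneg text q.2
    -- A's dict is the filtered entry list
    have hdict : (pvScoresA text).items = e.filter (fun q => decide (q.2 ≠ 0)) := by
      have := pv_dict_build e ⟨[]⟩ hend (by intro p _; simp [PySem.Dict.contains])
      rw [he, List.foldl_map] at this
      simpa [pvScoresA] using this
    set ef : List (String × Int) := e.filter (fun q => decide (q.2 ≠ 0)) with hef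
    have hefnd : (ef.map Prod.fst).Nodup :=
      List.Nodup.sublist (List.Sublist.map Prod.fst List.filter_sublist) hend
    -- B's recursion over the table is pvGoE over e, which is the left running-best fold over e
    have hB : pvBest text pvRouteKeywords
          = e.foldl (fun b q => if b.2 < q.2 then q else b) ("", 0) := by
      rw [pvBest_eq_goE, ← he, pv_runbest e henn ("", 0) (by norm_num)]
      rcases pvGoE_cases e with h | h
      · rw [h]; norm_num
      · rw [if_pos (by norm_num; omega)]
    have hsc : pvScoresA text = (⟨ef⟩ : PySem.Dict String Int) := by rw [← hdict]
    rw [hB, hsc]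
    -- invariant at the end of the left pass
    have hinv := pv_main e henn ("", 0) none (Or.inl ⟨rfl, rfl, rfl⟩)
    set b' := e.foldl (fun b q => if b.2 < q.2 then q else b) ("", 0) with hb'
    have hmax : PySem.List.max? ef Prod.snd
        = e.foldl (fun acc q => if decide (q.2 ≠ 0) = true then pvMstep Prod.snd acc q else acc) none := by
      rw [pv_max?_eq_foldl, hef, List.foldl_filter]
    simp only [hb'] at hinv
    rw [← hmax] at hinv
    rcases hinv with ⟨h1, h2, h3⟩ | ⟨h1, h2⟩
    · -- no keyword matched: the dict is empty and the running best stayed ("", 0)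
      have hnil : ef = [] := (PySem.List.max?_eq_none_iff ef Prod.snd).mp h2
      rw [if_pos (by rw [hnil]), h3]
    · -- some agent scored: both return the first agent with the maximal score
      have hefne : ef ≠ [] := by
        intro hnil
        rw [hnil] at h2
        simp [PySem.List.max?] at h2
      rw [if_neg (by simpa using hefne)]
      have hgetD : ∀ q ∈ ef, (PySem.Dict.getD ⟨ef⟩ q.1 0 : Int) = q.2 := by
        intro q hq
        simp [PySem.Dict.getD, PySem.Dict.get?, pv_find_self ef hefnd q hq]
      have hA : PySem.List.max? (PySem.Dict.keys (⟨ef⟩ : PySem.Dict String Int))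
            (fun a => PySem.Dict.getD ⟨ef⟩ a 0)
          = (PySem.List.max? ef Prod.snd).map Prod.fst := by
        rw [show PySem.Dict.keys (⟨ef⟩ : PySem.Dict String Int) = ef.map Prod.fst from rfl,
          pv_max?_eq_foldl]
        have hmm := pv_max?_map (κ := Int) Prod.fst (fun a => PySem.Dict.getD ⟨ef⟩ a 0) ef none
        simp only [Option.map_none] at hmm
        rw [hmm, pv_fold_congr (fun x => PySem.Dict.getD ⟨ef⟩ x.1 0) Prod.snd ef hgetD none
          (by intro m hm; cases hm), ← pv_max?_eq_foldl]
      rw [hA, h2]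
      simp [hb']
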